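-- pv_equiv track=rewrite | github.com/Warhorze/cplt | src/csvplot/completions.py | _sort_columns_for_position
-- ===== SOURCE A (Python) =====
-- _START_KEYWORDS = {"start", "begin", "van", "from", "first"}
--
-- _END_KEYWORDS = {"end", "eind", "stop", "last", "final", "tot", "until"}
--
-- def _matches_keywords(column: str, keywords: set[str]) -> bool:
--     """Check if a column name contains any of the given keywords (case-insensitive)."""
--     col_lower = column.lower()
--     return any(kw in col_lower for kw in keywords)
--
-- def _sort_columns_for_position(columns: list[str], position: int) -> list[str]:
--     """Sort columns with positional awareness for --x completion.
--
--     Even positions (0, 2, 4) = start columns first.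
--     Odd positions (1, 3, 5) = end columns first.
--     """
--     if position % 2 == 0:
--         preferred_keywords = _START_KEYWORDS
--     else:
--         preferred_keywords = _END_KEYWORDS
--
--     preferred = sorted(c for c in columns if _matches_keywords(c, preferred_keywords))
--     rest = sorted(c for c in columns if not _matches_keywords(c, preferred_keywords))
--     return preferred + rest
-- ===== SOURCE B (Python) =====
-- _START_KEYWORDS = {"start", "begin", "van", "from", "first"}
--
-- _END_KEYWORDS = {"end", "eind", "stop", "last", "final", "tot", "until"}
--
--
-- def _matches_keywords(column: str, keywords: set[str]) -> bool:
--     """Check if a column name contains any of the given keywords (case-insensitive)."""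
--     col_lower = column.lower()
--     return any(kw in col_lower for kw in keywords)
--
--
-- def _sort_columns_for_position(columns: list[str], position: int) -> list[str]:
--     """Single stable sort with a composite key: keyword-matching columns first,
--     alphabetical within each group."""
--     keywords = _START_KEYWORDS if position % 2 == 0 else _END_KEYWORDS
--     return sorted(columns, key=lambda c: (not _matches_keywords(c, keywords), c))
-- ===== Notes on version B (the rewrite author's own statement) =====
-- stated objective: idiomatic
-- what changed: Replaced the two filter-and-sort passes plus concatenation with one stable sort over the whole list using a composite key (not matches, name), relying on sort stability and False<True ordering.
import Mathlib
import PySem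

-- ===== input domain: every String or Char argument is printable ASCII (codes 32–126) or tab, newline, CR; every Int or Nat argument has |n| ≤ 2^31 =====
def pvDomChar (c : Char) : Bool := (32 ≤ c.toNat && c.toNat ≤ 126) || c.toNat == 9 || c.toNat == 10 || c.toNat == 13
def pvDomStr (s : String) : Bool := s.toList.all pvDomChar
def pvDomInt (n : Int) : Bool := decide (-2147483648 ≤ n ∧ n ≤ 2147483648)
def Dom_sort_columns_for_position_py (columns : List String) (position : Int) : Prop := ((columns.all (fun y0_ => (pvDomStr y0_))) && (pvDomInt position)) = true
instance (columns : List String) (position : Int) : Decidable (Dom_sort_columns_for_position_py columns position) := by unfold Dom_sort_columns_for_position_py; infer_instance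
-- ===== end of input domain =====

-- B replaces A's two filter-and-sort passes plus concatenation by ONE stable sort with the
-- composite key (not matches, name); same return value, same cost (objective: idiomatic).

-- ===== PORT A =====
def pvStartKeywords : List String := ["start", "begin", "van", "from", "first"]
def pvEndKeywords : List String := ["end", "eind", "stop", "last", "final", "tot", "until"]

-- _matches_keywords (shared helper of both Pythons; 'any' over a set is order-independent,
-- so the set is carried as a list of its elements)
def matches_keywords_py (column : String) (keywords : List String) : Bool :=
  let col_lower := PySem.Str.lower column
  keywords.any (fun kw => PySem.Str.isIn kw col_lower)

def sort_columns_for_position_py (columns : List String) (position : Int) : List String :=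
  let preferred_keywords := if PySem.Int.mod position 2 = 0 then pvStartKeywords else pvEndKeywords
  let preferred := PySem.List.sorted (columns.filter (fun c => matches_keywords_py c preferred_keywords)) (fun c => c) false
  let rest := PySem.List.sorted (columns.filter (fun c => !(matches_keywords_py c preferred_keywords))) (fun c => c) false
  preferred ++ rest

-- ===== PORT B =====
def sort_columns_for_position_py_alt (columns : List String) (position : Int) : List String :=
  let keywords := if PySem.Int.mod position 2 = 0 then pvStartKeywords else pvEndKeywords
  PySem.List.sorted2 columns (fun c => !(matches_keywords_py c keywords)) (fun c => c) false

-- ===== PRECONDITION & SPEC =====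
def Spec_sort_columns_for_position_py (columns : List String) (position : Int) (out : List String) : Prop := out = sort_columns_for_position_py_alt columns position
instance (columns : List String) (position : Int) (out : List String) : Decidable (Spec_sort_columns_for_position_py columns position out) := by unfold Spec_sort_columns_for_position_py; infer_instance

-- ===== CLAIM (what is proved, stated in full; the proofs are below) =====
def Claim_equal_sort_columns_for_position_py : Prop := ∀ (columns : List String) (position : Int), Dom_sort_columns_for_position_py columns position → Spec_sort_columns_for_position_py columns position (sort_columns_for_position_py columns position)

-- ===== LEMMAS AND PROOFS =====

-- inserting an element that compares 'before' every element of B lands at the boundary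
theorem insertBy_append_of_before {α : Type} (before : α → α → Bool) (x : α) (A B : List α)
    (hB : ∀ b ∈ B, before x b = true) :
    PySem.List.insertBy before x (A ++ B) = PySem.List.insertBy before x A ++ B := by
  induction A with
  | nil =>
    cases B with
    | nil => rfl
    | cons b B => simp [PySem.List.insertBy, hB b (by simp)]
  | cons a A ih =>
    by_cases h : before x a = true
    · simp [PySem.List.insertBy, h]
    · simp only [List.cons_append, PySem.List.insertBy, h]
      simp [ih]

-- inserting an element that compares 'not before' every element of A skips past A
theorem insertBy_append_of_not_before {α : Type} (before : α → α → Bool) (x : α) (A B : List α)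
    (hA : ∀ a ∈ A, before x a = false) :
    PySem.List.insertBy before x (A ++ B) = A ++ PySem.List.insertBy before x B := by
  induction A with
  | nil => rfl
  | cons a A ih =>
    simp only [List.cons_append, PySem.List.insertBy, hA a (by simp)]
    simp [ih (fun a ha => hA a (by simp [ha]))]

-- insertBy only looks at 'before x ·' on the elements of the list
theorem insertBy_congr {α : Type} (before before' : α → α → Bool) (x : α) (A : List α)
    (h : ∀ a ∈ A, before x a = before' x a) :
    PySem.List.insertBy before x A = PySem.List.insertBy before' x A := by
  induction A with
  | nil => rfl
  | cons a A ih =>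
    simp only [PySem.List.insertBy, h a (by simp)]
    by_cases h' : before' x a = true
    · simp [h']
    · simp only [h']
      simp [ih (fun a ha => h a (by simp [ha]))]

-- loop invariant: the composite-key insertion sort keeps the p-block before the ¬p-block,
-- each block being the plain string insertion sort of its group
theorem foldl_insertBy_split (p : String → Bool) (xs : List String) :
    ∀ (A B : List String), (∀ a ∈ A, p a = true) → (∀ b ∈ B, p b = false) →
    xs.foldl (fun acc x => PySem.List.insertBy
        (fun a b => decide ((!p a) < (!p b)) || (!decide ((!p b) < (!p a)) && decide (a < b))) x acc) (A ++ B)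
    = (xs.filter p).foldl (fun acc x => PySem.List.insertBy (fun a b => decide (a < b)) x acc) A
      ++ (xs.filter (fun x => !p x)).foldl (fun acc x => PySem.List.insertBy (fun a b => decide (a < b)) x acc) B := by
  induction xs with
  | nil => intro A B _ _; simp
  | cons x xs ih =>
    intro A B hA hB
    by_cases hp : p x = true
    · have h1 : PySem.List.insertBy
          (fun a b => decide ((!p a) < (!p b)) || (!decide ((!p b) < (!p a)) && decide (a < b))) x (A ++ B)
          = PySem.List.insertBy (fun a b => decide (a < b)) x A ++ B := by
        rw [insertBy_append_of_before _ _ _ _ (fun b hb => by simp [hp, hB b hb])]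
        rw [insertBy_congr _ (fun a b => decide (a < b)) x A (fun a ha => by simp [hp, hA a ha])]
      have hA' : ∀ a ∈ PySem.List.insertBy (fun a b => decide (a < b)) x A, p a = true := by
        intro a ha
        rcases (PySem.List.mem_insertBy _ _ _ _).1 ha with h | h
        · simpa [h] using hp
        · exact hA a h
      have hfil1 : (x :: xs).filter p = x :: xs.filter p := by simp [hp]
      have hfil2 : (x :: xs).filter (fun x => !p x) = xs.filter (fun x => !p x) := by
        simp [hp]
      rw [List.foldl_cons, h1, hfil1, hfil2, List.foldl_cons]
      exact ih _ B hA' hB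
    · have hpx : p x = false := by simpa using hp
      have h1 : PySem.List.insertBy
          (fun a b => decide ((!p a) < (!p b)) || (!decide ((!p b) < (!p a)) && decide (a < b))) x (A ++ B)
          = A ++ PySem.List.insertBy (fun a b => decide (a < b)) x B := by
        rw [insertBy_append_of_not_before _ _ _ _ (fun a ha => by simp [hpx, hA a ha])]
        rw [insertBy_congr _ (fun a b => decide (a < b)) x B (fun b hb => by simp [hpx, hB b hb])]
      have hB' : ∀ b ∈ PySem.List.insertBy (fun a b => decide (a < b)) x B, p b = false := by
        intro b hb
        rcases (PySem.List.mem_insertBy _ _ _ _).1 hb with h | h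
        · simpa [h] using hpx
        · exact hB b h
      have hfil1 : (x :: xs).filter p = xs.filter p := by simp [hpx]
      have hfil2 : (x :: xs).filter (fun x => !p x) = x :: xs.filter (fun x => !p x) := by
        simp [hpx]
      rw [List.foldl_cons, h1, hfil1, hfil2, List.foldl_cons]
      exact ih A _ hA hB'

-- B's one composite-key stable sort equals A's sorted-preferred ++ sorted-rest
theorem sorted2_eq_filter_append (p : String → Bool) (xs : List String) :
    PySem.List.sorted2 xs (fun c => !p c) (fun c => c) false
    = PySem.List.sorted (xs.filter p) (fun c => c) false
      ++ PySem.List.sorted (xs.filter (fun c => !p c)) (fun c => c) false := by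
  rw [PySem.List.sorted_eq_foldl_insertBy, PySem.List.sorted_eq_foldl_insertBy]
  have h := foldl_insertBy_split p xs [] [] (by simp) (by simp)
  simpa [PySem.List.sorted2] using h

-- ===== VERDICT (by name: the statement is the Claim_ definition above) =====
theorem sort_columns_for_position_py_spec : Claim_equal_sort_columns_for_position_py := by
  intro columns position _
  show sort_columns_for_position_py columns position = sort_columns_for_position_py_alt columns position
  unfold sort_columns_for_position_py sort_columns_for_position_py_alt
  exact (sorted2_eq_filter_append
    (fun c => matches_keywords_py c (if PySem.Int.mod position 2 = 0 then pvStartKeywords else pvEndKeywords))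
    columns).symm
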